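-- pv_equiv track=rewrite | github.com/peterkaragyozov/SoftUni-Courses | Python Advanced/01. Lists as Stacks and Queues/Lab/02. Matching Brackets.py | get_subexpressions
-- ===== SOURCE A (Python) =====
-- def get_subexpressions(expression):
--     s = []
--     result = []
--     for index in range(len(expression)):
--         ch = expression[index]
--         if ch == "(":
--             s.append(index)
--         elif ch == ")":
--             start_index = s.pop()
--             result.append(expression[start_index:index + 1])
--     return result
-- ===== SOURCE B (Python) =====
-- def get_subexpressions(expression):
--     # For each ')', scan backwards with a depth counter to find its matching '(';
--     # no stack is kept.  A stray ')' (no match found) is simply skipped.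
--     result = []
--     for j, ch in enumerate(expression):
--         if ch == ')':
--             depth = 0
--             for i in range(j - 1, -1, -1):
--                 c = expression[i]
--                 if c == ')':
--                     depth += 1
--                 elif c == '(':
--                     if depth == 0:
--                         result.append(expression[i:j + 1])
--                         break
--                     depth -= 1
--     return result
-- ===== Notes on version B (the rewrite author's own statement) =====
-- stated objective: alternative
-- what changed: Replaces A's single forward pass with an index stack by a stackless nested scan: for every ')' a backward depth-counting scan locates its matching '(' directly.
import Mathlib
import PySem

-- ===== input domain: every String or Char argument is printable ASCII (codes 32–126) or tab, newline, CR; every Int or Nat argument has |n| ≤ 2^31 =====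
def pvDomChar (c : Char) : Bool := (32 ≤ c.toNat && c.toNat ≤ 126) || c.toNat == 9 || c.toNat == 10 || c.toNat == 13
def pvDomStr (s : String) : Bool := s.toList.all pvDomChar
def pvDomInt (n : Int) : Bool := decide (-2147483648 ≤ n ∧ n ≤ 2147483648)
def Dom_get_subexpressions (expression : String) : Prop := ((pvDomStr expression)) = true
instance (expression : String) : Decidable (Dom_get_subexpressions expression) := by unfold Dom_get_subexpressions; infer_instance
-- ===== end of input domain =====

-- B replaces A's single pass with an index stack by a stackless nested scan: for each ')'
-- a backward depth-counting scan finds its matching '(' (objective: alternative, not faster).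

-- ===== PORT A =====
-- A: one forward pass; '(' pushes its index, ')' pops and appends the slice.
-- Python's s.pop() raises IndexError on an empty stack (excluded by Pre_); the port skips there.
def stepA (expression : String) (st : List Nat × List String) (index : Nat) :
    List Nat × List String :=
  let ch := expression.toList.getD index ' '   -- expression[index], index < len: always in range
  if ch = '(' then (st.1 ++ [index], st.2)
  else if ch = ')' then
    match st.1.getLast? with                   -- s.pop(): none = IndexError, outside Pre_
    | some start_index =>
        (st.1.dropLast,
         st.2 ++ [PySem.Str.slice expression (some (start_index : Int)) (some ((index : Int) + 1))])
    | none => (st.1, st.2)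
  else (st.1, st.2)

def get_subexpressions (expression : String) : List String :=
  ((List.range expression.toList.length).foldl (stepA expression) ([], [])).2

-- ===== PORT B =====
-- inner `for i in range(j-1,-1,-1)` of Source B: argument `i+1` means index i is examined next
def findOpen (cs : List Char) (depth : Nat) : Nat → Option Nat
  | 0 => none
  | i + 1 =>
    let c := cs.getD i ' '
    if c = ')' then findOpen cs (depth + 1) i
    else if c = '(' then (if depth = 0 then some i else findOpen cs (depth - 1) i)
    else findOpen cs depth i

def stepB (expression : String) (result : List String) (p : Char × Nat) : List String :=
  if p.1 = ')' then
    match findOpen expression.toList 0 p.2 with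
    | some i =>
        result ++ [PySem.Str.slice expression (some (i : Int)) (some ((p.2 : Int) + 1))]
    | none => result
  else result

def get_subexpressions_alt (expression : String) : List String :=
  expression.toList.zipIdx.foldl (stepB expression) []

-- ===== PRECONDITION & SPEC =====
-- Pre_ excludes exactly the inputs on which Python A raises IndexError: strings with a
-- prefix containing more ')' than '(' (a stray ')' pops the empty stack).
def Pre_get_subexpressions (expression : String) : Prop :=
  ∀ j, j ≤ expression.toList.length →
    (expression.toList.take j).count ')' ≤ (expression.toList.take j).count '('
instance (expression : String) : Decidable (Pre_get_subexpressions expression) := by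
  unfold Pre_get_subexpressions; infer_instance
def pvWitness_get_subexpressions : String := "(a(b)c)(d)"

def Spec_get_subexpressions (expression : String) (out : List String) : Prop := out = get_subexpressions_alt expression
instance (expression : String) (out : List String) : Decidable (Spec_get_subexpressions expression out) := by unfold Spec_get_subexpressions; infer_instance

-- ===== CLAIM (what is proved, stated in full; the proofs are below) =====
def Claim_equal_get_subexpressions : Prop := ∀ (expression : String), Dom_get_subexpressions expression → Pre_get_subexpressions expression → Spec_get_subexpressions expression (get_subexpressions expression)

-- ===== LEMMAS AND PROOFS =====

-- the stack of unmatched '(' indices after reading j characters (pure recurrence)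
def stkU (cs : List Char) : Nat → List Nat
  | 0 => []
  | j + 1 =>
    if cs.getD j ' ' = '(' then stkU cs j ++ [j]
    else if cs.getD j ' ' = ')' then (stkU cs j).dropLast
    else stkU cs j

-- the result list after reading j characters (appended on each matched ')')
def resR (expression : String) : Nat → List String
  | 0 => []
  | j + 1 =>
    if expression.toList.getD j ' ' = ')' then
      match (stkU expression.toList j).getLast? with
      | some i =>
          resR expression j ++
            [PySem.Str.slice expression (some (i : Int)) (some ((j : Int) + 1))]
      | none => resR expression j
    else resR expression j

theorem stkU_succ (cs : List Char) (j : Nat) :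
    stkU cs (j + 1) =
      if cs.getD j ' ' = '(' then stkU cs j ++ [j]
      else if cs.getD j ' ' = ')' then (stkU cs j).dropLast
      else stkU cs j := rfl

theorem resR_succ (e : String) (j : Nat) :
    resR e (j + 1) =
      if e.toList.getD j ' ' = ')' then
        match (stkU e.toList j).getLast? with
        | some i =>
            resR e j ++ [PySem.Str.slice e (some (i : Int)) (some ((j : Int) + 1))]
        | none => resR e j
      else resR e j := rfl

theorem findOpen_succ (cs : List Char) (d i : Nat) :
    findOpen cs d (i + 1) =
      if cs.getD i ' ' = ')' then findOpen cs (d + 1) i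
      else if cs.getD i ' ' = '(' then (if d = 0 then some i else findOpen cs (d - 1) i)
      else findOpen cs d i := rfl

theorem dropLast_reverse_eq_tail {α : Type} (l : List α) :
    l.dropLast.reverse = l.reverse.tail := by
  induction l using List.reverseRecOn with
  | nil => simp
  | append_singleton xs x ih => simp

-- B's backward scan with start depth d finds the d-th unmatched '(' from the top of A's stack
theorem findOpen_eq (cs : List Char) :
    ∀ j d, findOpen cs d j = (stkU cs j).reverse[d]? := by
  intro j
  induction j with
  | zero => intro d; simp [findOpen, stkU]
  | succ j ih =>
    intro d
    rw [findOpen_succ, stkU_succ]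
    simp only [List.getD_eq_getElem?_getD]
    by_cases hc : cs[j]?.getD ' ' = ')'
    · have ho : ¬ cs[j]?.getD ' ' = '(' := by rw [hc]; decide
      rw [if_pos hc, if_neg ho, if_pos hc, dropLast_reverse_eq_tail, List.getElem?_tail]
      exact ih (d + 1)
    · by_cases ho : cs[j]?.getD ' ' = '('
      · cases d with
        | zero => simp [ho]
        | succ d => simp [ho, ih]
      · simp [hc, ho, ih]

theorem findOpen_zero_eq_getLast? (cs : List Char) (j : Nat) :
    findOpen cs 0 j = (stkU cs j).getLast? := by
  rw [findOpen_eq, ← List.head?_reverse, List.head?_eq_getElem?]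

theorem stkU_nil_of_getLast?_none (cs : List Char) (j : Nat)
    (h : (stkU cs j).getLast? = none) : stkU cs j = [] :=
  List.getLast?_eq_none_iff.mp h

theorem stepA_step (e : String) (j : Nat) :
    stepA e (stkU e.toList j, resR e j) j = (stkU e.toList (j + 1), resR e (j + 1)) := by
  rw [stkU_succ, resR_succ]
  simp only [stepA, List.getD_eq_getElem?_getD]
  by_cases ho : e.toList[j]?.getD ' ' = '('
  · simp [ho]
  · by_cases hc : e.toList[j]?.getD ' ' = ')'
    · cases hl : (stkU e.toList j).getLast? with
      | none => simp [hc, stkU_nil_of_getLast?_none e.toList j hl]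
      | some i => simp [hc]
    · simp [ho, hc]

theorem stepB_step (e : String) (j : Nat) :
    stepB e (resR e j) (e.toList.getD j ' ', j) = resR e (j + 1) := by
  rw [resR_succ]
  simp only [stepB, List.getD_eq_getElem?_getD, findOpen_zero_eq_getLast?]

theorem foldA_eq (e : String) :
    ∀ j, (List.range j).foldl (stepA e) ([], []) = (stkU e.toList j, resR e j) := by
  intro j
  induction j with
  | zero => simp [stkU, resR]
  | succ j ih =>
    rw [List.range_succ, List.foldl_append, ih]
    simpa using stepA_step e j

theorem zipIdx_eq_map_range {α : Type} (d : α) (cs : List α) :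
    cs.zipIdx = (List.range cs.length).map (fun i => (cs.getD i d, i)) := by
  apply List.ext_getElem
  · simp
  · intro n h1 h2
    have hn : n < cs.length := by simpa using h1
    simp [List.getD_eq_getElem?_getD, List.getElem?_eq_getElem hn]

theorem foldB_eq (e : String) :
    ∀ j, (List.range j).foldl (fun res i => stepB e res (e.toList.getD i ' ', i)) [] = resR e j := by
  intro j
  induction j with
  | zero => simp [resR]
  | succ j ih =>
    rw [List.range_succ, List.foldl_append, ih]
    simpa using stepB_step e j

theorem ports_agree (e : String) :
    get_subexpressions e = get_subexpressions_alt e := by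
  unfold get_subexpressions get_subexpressions_alt
  rw [zipIdx_eq_map_range ' ', List.foldl_map, foldB_eq, foldA_eq]

-- ===== VERDICT (by name: the statement is the Claim_ definition above) =====
theorem get_subexpressions_spec : Claim_equal_get_subexpressions := by
  intro expression _ _
  unfold Spec_get_subexpressions
  exact ports_agree expression
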